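-- pv_equiv track=rewrite | github.com/mbuccoli/adventofcode2024 | src/day7.py | compute_res
-- ===== SOURCE A (Python) =====
-- def compute_res(vals):
--     if len(vals)==1:
--         return vals
--     results=[]
--     possible_comb = 2**(len(vals)-1) # if I have 4 values, I have 2*2*2 = 8 possible combinations of operators
--     for comb in range(possible_comb):   # let's scroll that
--         partial_res=vals[0]    # first I use compute
--         for i in range(1,len(vals)):   # than for all the possible values in the following
--             if ((1<<(i-1)) & comb):   # I place a 1 and check if the bit in the i-th position is 0 or 1, and I multiply or sum accordingly
--                 partial_res *= vals[i]
--             else: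
--                 partial_res += vals[i]
--         results.append(partial_res)
--     return results
-- ===== SOURCE B (Python) =====
-- def compute_res(vals):
--     acc = [vals[0]]
--     for v in vals[1:]:
--         acc = [x + v for x in acc] + [x * v for x in acc]
--     return acc
-- ===== Notes on version B (the rewrite author's own statement) =====
-- stated objective: faster
-- what changed: Replaces the O(n*2^n) per-combination bitmask re-evaluation (outer loop over 2^(n-1) masks, inner fold over the list for each mask) with a single level-by-level doubling pass that extends every partial result by + and by * at each value, in the same output order; intended as faster (O(2^n) vs O(n*2^n)) and measured 10.01x at n=16 — at n=64 the output itself has 2^63 entries so neither program finishes.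
import Mathlib
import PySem

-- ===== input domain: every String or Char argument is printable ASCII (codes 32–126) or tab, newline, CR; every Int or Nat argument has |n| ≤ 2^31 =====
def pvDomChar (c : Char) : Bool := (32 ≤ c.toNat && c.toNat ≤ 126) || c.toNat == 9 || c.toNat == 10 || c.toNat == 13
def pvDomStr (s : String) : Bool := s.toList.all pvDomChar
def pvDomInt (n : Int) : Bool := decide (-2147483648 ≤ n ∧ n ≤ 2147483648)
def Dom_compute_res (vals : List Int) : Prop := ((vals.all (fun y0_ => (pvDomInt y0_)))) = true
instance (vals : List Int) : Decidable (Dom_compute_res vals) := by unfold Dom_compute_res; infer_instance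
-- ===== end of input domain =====

-- B replaces A's per-mask re-evaluation (2^(n-1) masks, a full fold each) with one
-- level-by-level doubling pass over the value list; intended as faster (O(2^n) vs
-- O(n*2^n); measured 10x at n=16 — at larger n the exponential output bounds both).


-- ===== PORT A =====
def compute_res (vals : List Int) : List Int :=
  if vals.length == 1 then vals
  else
    -- possible_comb = 2**(len(vals)-1)
    (PySem.List.pyRange 0 ((2 : Int) ^ (vals.length - 1)) 1).foldl
      (fun results comb =>
        results ++
          [(PySem.List.pyRange 1 (vals.length : Int) 1).foldl
            (fun partial_res i =>
              -- Python: (1 << (i-1)) & comb — both operands nonnegative here (i ≥ 1, comb ≥ 0),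
              -- so the Nat computation is exact
              if ((1 : Nat) <<< (i - 1).toNat) &&& comb.toNat ≠ 0 then
                partial_res * PySem.List.pyGetD vals i 0
              else
                partial_res + PySem.List.pyGetD vals i 0)
            (PySem.List.pyGetD vals 0 0)])  -- vals[0] and vals[i]: always in range under Pre_
      []

-- ===== PORT B =====
def altStep (acc : List Int) (v : Int) : List Int :=
  acc.map (fun x => x + v) ++ acc.map (fun x => x * v)

def compute_res_alt (vals : List Int) : List Int :=
  match vals with
  | [] => []          -- unreachable under Pre_ (Python B raises IndexError on [])
  | v :: rest => rest.foldl altStep [v]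

-- ===== PRECONDITION & SPEC =====
-- Pre_ excludes only the empty list, on which Python A raises TypeError (range(2**-1))
-- and Python B raises IndexError.
def Pre_compute_res (vals : List Int) : Prop := vals ≠ []
instance (vals : List Int) : Decidable (Pre_compute_res vals) := by unfold Pre_compute_res; infer_instance
def pvWitness_compute_res : List Int := ([1, 2] : List Int)

def Spec_compute_res (vals : List Int) (out : List Int) : Prop := out = compute_res_alt vals
instance (vals : List Int) (out : List Int) : Decidable (Spec_compute_res vals out) := by unfold Spec_compute_res; infer_instance

-- ===== CLAIM (what is proved, stated in full; the proofs are below) =====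
def Claim_equal_compute_res : Prop := ∀ (vals : List Int), Dom_compute_res vals → Pre_compute_res vals → Spec_compute_res vals (compute_res vals)

-- ===== LEMMAS AND PROOFS =====

-- Mathematical middle ground: evaluate one operator combination (bit t of c picks * for
-- the t-th remaining value, else +), consuming bits low-to-high.
def evalC (p : Int) (rest : List Int) (c : Nat) : Int :=
  match rest with
  | [] => p
  | x :: xs => evalC (if c % 2 = 1 then p * x else p + x) xs (c / 2)

theorem range_double (m : Nat) :
    List.range (2 * m) = (List.range m).flatMap (fun c => [2 * c, 2 * c + 1]) := by
  induction m with
  | zero => simp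
  | succ m ih =>
      rw [List.range_succ, List.flatMap_append, ← ih, Nat.mul_succ,
        show 2 * m + 2 = (2 * m + 1) + 1 from rfl, List.range_succ, List.range_succ]
      simp

-- B side: the doubling fold enumerates all combinations in mask order.
theorem foldl_altStep (xs : List Int) (acc : List Int) :
    xs.foldl altStep acc
      = (List.range (2 ^ xs.length)).flatMap (fun c => acc.map (fun p => evalC p xs c)) := by
  induction xs generalizing acc with
  | nil => simp [evalC]
  | cons x xs ih =>
      rw [List.foldl_cons, ih]
      have h2 : (2 : Nat) ^ (x :: xs).length = 2 * 2 ^ xs.length := by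
        simp [pow_succ]; ring
      rw [h2, range_double, List.flatMap_assoc]
      refine congrArg (fun f => List.flatMap f (List.range (2 ^ xs.length))) (funext fun c => ?_)
      simp [altStep, evalC, List.map_map, Nat.mul_add_div, Function.comp_def]

theorem bit_test (c s : Nat) : (c &&& 2 ^ s ≠ 0) ↔ c / 2 ^ s % 2 = 1 := by
  rw [Nat.and_two_pow]
  have ht : c.testBit s = true ↔ c / 2 ^ s % 2 = 1 := by
    rw [Nat.testBit, Nat.shiftRight_eq_div_pow, Nat.and_comm, Nat.and_one_is_mod]
    simp
  have hp : (2 : Nat) ^ s ≠ 0 := by positivity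
  rcases h : c.testBit s with _ | _
  · simp only [Bool.toNat_false, Nat.zero_mul, ne_eq]
    constructor
    · intro hne; exact absurd trivial hne
    · intro hc; exact absurd (ht.mpr hc) (by simp [h])
  · simp only [Bool.toNat_true, Nat.one_mul, ne_eq, hp, not_false_eq_true, true_iff]
    exact ht.mp h

-- A side: the inner index fold over vals equals evalC on the dropped tail, bits shifted by s.
theorem inner_fold (d : List Int) : ∀ (vals : List Int) (s : Nat) (p : Int) (c : Nat),
    vals.drop (s + 1) = d →
    (PySem.List.pyRange ((s : Int) + 1) (vals.length : Int) 1).foldl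
      (fun partial_res i =>
        if ((1 : Nat) <<< (i - 1).toNat) &&& ((c : Int)).toNat ≠ 0 then
          partial_res * PySem.List.pyGetD vals i 0
        else
          partial_res + PySem.List.pyGetD vals i 0) p
    = evalC p d (c / 2 ^ s) := by
  induction d with
  | nil =>
      intro vals s p c hd
      have hlen : vals.length ≤ s + 1 := by
        have h0 := congrArg List.length hd
        simp only [List.length_drop, List.length_nil] at h0
        omega
      rw [PySem.List.pyRange_one_eq_nil (by exact_mod_cast hlen)]
      simp [evalC]
  | cons x xs ih =>
      intro vals s p c hd
      have hlen : s + 1 < vals.length := by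
        have h0 := congrArg List.length hd
        simp only [List.length_drop, List.length_cons] at h0
        omega
      have hget : PySem.List.pyGetD vals ((s : Int) + 1) 0 = x := by
        have h1 : vals[s + 1]'hlen = x := by
          have h2 := List.getElem_drop (xs := vals) (i := s + 1) (j := 0)
            (h := by simp [hd])
          simpa [hd] using h2.symm
        rw [show ((s : Int) + 1) = ((s + 1 : Nat) : Int) by push_cast; ring,
          PySem.List.pyGetD_natCast]
        simp [hlen, h1]
      rw [PySem.List.pyRange_one_cons (by exact_mod_cast hlen)]
      rw [List.foldl_cons]
      have hbit : (((1 : Nat) <<< (((s : Int) + 1) - 1).toNat) &&& ((c : Int)).toNat ≠ 0)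
          ↔ (c / 2 ^ s % 2 = 1) := by
        have he : (((s : Int) + 1) - 1).toNat = s := by omega
        rw [he, Nat.one_shiftLeft, Nat.and_comm, Int.toNat_natCast]
        exact bit_test c s
      have hstep :
          (if ((1 : Nat) <<< (((s : Int) + 1) - 1).toNat) &&& ((c : Int)).toNat ≠ 0 then
            p * PySem.List.pyGetD vals ((s : Int) + 1) 0
          else p + PySem.List.pyGetD vals ((s : Int) + 1) 0)
          = (if c / 2 ^ s % 2 = 1 then p * x else p + x) := by
        rw [hget]
        by_cases h : c / 2 ^ s % 2 = 1
        · rw [if_pos (hbit.mpr h), if_pos h]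
        · rw [if_neg (fun hh => h (hbit.mp hh)), if_neg h]
      rw [hstep]
      have hrec := ih vals (s + 1) (if c / 2 ^ s % 2 = 1 then p * x else p + x) c
        (by simpa [List.drop_drop, Nat.add_comm] using congrArg (List.drop 1) hd)
      rw [show (((s + 1 : Nat) : Int) + 1) = ((s : Int) + 1 + 1) by push_cast; ring] at hrec
      rw [hrec]
      have hdd : c / 2 ^ (s + 1) = c / 2 ^ s / 2 := by
        rw [pow_succ, Nat.div_div_eq_div_mul]
      rw [hdd, evalC]

-- A's whole result for a nonempty list, in evalC form.
theorem compute_res_eq (v : Int) (rest : List Int) :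
    compute_res (v :: rest)
      = (List.range (2 ^ rest.length)).map (fun c => evalC v rest c) := by
  by_cases h1 : rest = []
  · subst h1; simp [compute_res, evalC]
  · have hlen1 : ((v :: rest).length == 1) = false := by
      cases rest with
      | nil => exact absurd rfl h1
      | cons y ys => simp
    rw [compute_res, hlen1]
    simp only [Bool.false_eq_true, if_false]
    have hpow : ((2 : Int) ^ ((v :: rest).length - 1)) = ((2 ^ rest.length : Nat) : Int) := by
      push_cast; simp
    rw [hpow, PySem.List.pyRange_zero_nat]
    rw [PySem.List.foldl_append_singleton_eq_map]
    rw [List.map_map]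
    refine List.map_congr_left (fun c _ => ?_)
    have hget0 : PySem.List.pyGetD (v :: rest) 0 0 = v := by
      simp [pysem]
    have h := inner_fold rest (v :: rest) 0 v c (by simp)
    simp only [Nat.cast_zero, zero_add, pow_zero, Nat.div_one] at h
    simpa [hget0] using h

-- ===== VERDICT (by name: the statement is the Claim_ definition above) =====
theorem compute_res_spec : Claim_equal_compute_res := by
  intro vals _ hpre
  unfold Spec_compute_res
  match vals, hpre with
  | v :: rest, _ =>
    rw [compute_res_eq]
    show _ = rest.foldl altStep [v]
    rw [foldl_altStep]
    rw [List.map_eq_flatMap]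
    simp
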